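-- pv_equiv track=rewrite | github.com/mratet/advent-of-code_python | solutions/2016/day_11.py | bfs
-- ===== SOURCE A (Python) =====
-- import itertools
-- from collections import defaultdict, deque
--
-- def will_explode(current_pairs_tuple):
--     for pair in current_pairs_tuple:
--         g_floor, c_floor = pair
--         if g_floor != c_floor and any(gf == c_floor for (gf, _) in current_pairs_tuple):
--             return True
--     return False
--
-- def bfs(current_pairs_tuple):
--     queue = deque([(0, current_pairs_tuple, 0)])
--     seen = {(0, current_pairs_tuple)}
--
--     while queue:
--         current_elevator_pos, current_pairs_tuple, cnt = queue.popleft()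
--
--         if all(pair == (3, 3) for pair in current_pairs_tuple):
--             return cnt
--
--         items_on_current_floor = []
--         for idx, (g_floor, c_floor) in enumerate(current_pairs_tuple):
--             if g_floor == current_elevator_pos:
--                 items_on_current_floor.append((idx, "G"))
--             if c_floor == current_elevator_pos:
--                 items_on_current_floor.append((idx, "M"))
--
--         for next_elevator_pos in (current_elevator_pos - 1, current_elevator_pos + 1):
--             if not (0 <= next_elevator_pos <= 3):
--                 continue
--
--             for num_items_to_move in [1, 2]:
--                 if len(items_on_current_floor) < num_items_to_move:
--                     continue
--
--                 for combo in itertools.combinations(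
--                     items_on_current_floor, num_items_to_move
--                 ):
--                     next_pairs = list(current_pairs_tuple)
--
--                     for pair_idx, item_type in combo:
--                         g_floor, c_floor = next_pairs[pair_idx]
--                         next_pairs[pair_idx] = (
--                             (next_elevator_pos, c_floor)
--                             if item_type == "G"
--                             else (g_floor, next_elevator_pos)
--                         )
--
--                     next_pairs.sort()
--                     next_pairs_tuple = tuple(next_pairs)
--
--                     if will_explode(next_pairs_tuple):
--                         continue
--
--                     new_state = (next_elevator_pos, next_pairs_tuple)
--                     if new_state in seen:
--                         continue
--
--                     seen.add(new_state)
--                     queue.append((next_elevator_pos, next_pairs_tuple, cnt + 1))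
-- ===== SOURCE B (Python) =====
-- def will_explode(current_pairs_tuple):
--     for pair in current_pairs_tuple:
--         g_floor, c_floor = pair
--         if g_floor != c_floor and any(gf == c_floor for (gf, _) in current_pairs_tuple):
--             return True
--     return False
--
--
-- def pairs_of(items):
--     # all 2-element picks of items, in order
--     if not items:
--         return []
--     head, tail = items[0], items[1:]
--     return [[head, y] for y in tail] + pairs_of(tail)
--
--
-- def neighbors(elev, pairs):
--     items = []
--     for idx, (g, c) in enumerate(pairs):
--         if g == elev:
--             items.append((idx, "G"))
--         if c == elev:
--             items.append((idx, "M"))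
--     out = []
--     for ne in (elev - 1, elev + 1):
--         if 0 <= ne <= 3:
--             for mv in [[it] for it in items] + pairs_of(items):
--                 np = list(pairs)
--                 for idx, t in mv:
--                     g, c = np[idx]
--                     np[idx] = (ne, c) if t == "G" else (g, ne)
--                 np.sort()
--                 st = (ne, tuple(np))
--                 if not will_explode(st[1]):
--                     out.append(st)
--     return out
--
--
-- def bfs(current_pairs_tuple):
--     # Bellman-Ford-style fixpoint on the unit-cost state graph: no queue and no
--     # early exit.  dist maps each discovered state to (distance, adjacency list,
--     # computed once at insertion); we sweep the whole map, recording each unseen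
--     # neighbor at its parent's distance + 1, until a sweep changes nothing; the
--     # answer is then the smallest distance recorded at any goal state.
--     start = (0, current_pairs_tuple)
--     dist = {start: (0, neighbors(start[0], start[1]))}
--     changed = True
--     while changed:
--         changed = False
--         for state, (d, nbs) in list(dist.items()):
--             for st in nbs:
--                 if st not in dist:
--                     dist[st] = (d + 1, neighbors(st[0], st[1]))
--                     changed = True
--     goals = [d for (_, pairs), (d, _) in dist.items() if all(p == (3, 3) for p in pairs)]
--     return min(goals) if goals else None
-- ===== Notes on version B (the rewrite author's own statement) =====
-- stated objective: alternative
-- what changed: A's early-exit FIFO-deque BFS is replaced by a Bellman-Ford-style fixpoint: a dict maps each discovered state to (distance, adjacency list computed once at insertion), the whole map is swept repeatedly, recording unseen neighbors at parent distance + 1, until a sweep changes nothing, and the answer is the minimum distance over all recorded goal states (no queue, no early exit).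
import Mathlib
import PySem

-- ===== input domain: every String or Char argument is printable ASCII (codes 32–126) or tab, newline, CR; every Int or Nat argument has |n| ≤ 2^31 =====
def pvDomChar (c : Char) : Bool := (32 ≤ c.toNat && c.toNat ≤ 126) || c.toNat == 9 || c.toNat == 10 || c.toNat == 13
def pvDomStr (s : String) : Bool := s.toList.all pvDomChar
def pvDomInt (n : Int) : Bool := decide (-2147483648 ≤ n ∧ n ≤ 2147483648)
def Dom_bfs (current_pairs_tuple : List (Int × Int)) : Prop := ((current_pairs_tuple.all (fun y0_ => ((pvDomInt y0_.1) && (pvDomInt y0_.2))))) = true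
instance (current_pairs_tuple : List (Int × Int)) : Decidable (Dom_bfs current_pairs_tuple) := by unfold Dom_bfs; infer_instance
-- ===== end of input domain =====

-- B replaces A's early-exit FIFO-queue BFS by a Bellman-Ford-style fixpoint:
-- it sweeps the whole distance map (state -> distance and adjacency, stored at
-- insertion) until a sweep adds nothing, then returns the smallest distance
-- recorded at any goal state; objective: alternative structure, same exact result.

abbrev StT := Int × List (Int × Int)

-- ===== PORT A =====
-- helpers shared by both Pythons (will_explode is module-shared; the item
-- enumeration and move application are the same code in both sources)
def willExplode (ps : List (Int × Int)) : Bool :=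
  ps.any (fun pair => pair.1 != pair.2 && ps.any (fun q => q.1 == pair.2))

def itemsOnFloor (elev : Int) (ps : List (Int × Int)) : List (Int × Char) :=
  (PySem.List.enumerate ps).foldl (fun acc ic =>
    let acc1 := if ic.2.1 == elev then acc ++ [(ic.1, 'G')] else acc
    if ic.2.2 == elev then acc1 ++ [(ic.1, 'M')] else acc1) []

-- next_pairs[pair_idx] read/write; the index comes from enumerate so it is
-- always in range and the getD default is never used (exact)
def applyCombo (ps : List (Int × Int)) (ne : Int) (combo : List (Int × Char)) : List (Int × Int) :=
  combo.foldl (fun np it =>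
    let gc := PySem.List.pyGetD np it.1 (0, 0)
    (PySem.List.pySet? np it.1 (if it.2 == 'G' then (ne, gc.2) else (gc.1, ne))).getD np) ps

-- list.sort() on int pairs = Python's lexicographic tuple order
def sortPairs (l : List (Int × Int)) : List (Int × Int) :=
  PySem.List.sorted2 l Prod.fst Prod.snd

-- the while loop over the deque; the fuel argument is only a totality guard
-- (a proven-sufficient bound on the number of pops — BFS visits each of the
-- finitely many states at most once)
def loopA : Nat → List (Int × List (Int × Int) × Int) → PySem.Set (Int × List (Int × Int)) → Option (Option Int)
  | 0, _, _ => none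
  | _ + 1, [], _ => some none
  | fuel + 1, (e, ps, cnt) :: rest, seen =>
    if ps.all (fun p => p == ((3 : Int), (3 : Int))) then some (some cnt)
    else
      let items := itemsOnFloor e ps
      let step :=
        [e - 1, e + 1].foldl (fun acc ne =>
          if 0 ≤ ne ∧ ne ≤ 3 then
            ([1, 2] : List Nat).foldl (fun acc k =>
              if items.length < k then acc
              else
                (PySem.List.combinations items k).foldl (fun acc combo =>
                  let np := sortPairs (applyCombo ps ne combo)
                  if willExplode np then acc
                  else if PySem.Set.contains acc.2 (ne, np) then acc
                  else (acc.1 ++ [(ne, np, cnt + 1)], PySem.Set.add acc.2 (ne, np))) acc) acc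
          else acc)
          (([] : List (Int × List (Int × Int) × Int)), seen)
      loopA fuel (rest ++ step.1) step.2

def bfs (current_pairs_tuple : List (Int × Int)) : Option Int :=
  (loopA (2 * (4 * ((4 + 2 * current_pairs_tuple.length) ^ 2) ^ current_pairs_tuple.length) + 3)
      [(0, current_pairs_tuple, 0)]
      (PySem.Set.ofList [(0, current_pairs_tuple)])).getD none

-- ===== PORT B =====
def pairsOf (items : List (Int × Char)) : List (List (Int × Char)) :=
  match items with
  | [] => []
  | head :: tail => tail.map (fun y => [head, y]) ++ pairsOf tail

def neighborsB (elev : Int) (ps : List (Int × Int)) : List (Int × List (Int × Int)) :=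
  let items := itemsOnFloor elev ps
  [elev - 1, elev + 1].foldl (fun out ne =>
    if 0 ≤ ne ∧ ne ≤ 3 then
      (items.map (fun it => [it]) ++ pairsOf items).foldl (fun out mv =>
        let np := sortPairs (applyCombo ps ne mv)
        if !willExplode np then out ++ [(ne, np)] else out) out
    else out) []

-- one sweep of the whole map ('for state, (d, nbs) in list(dist.items()): …'):
-- each unseen neighbor is recorded at distance d + 1 with its adjacency list
def roundFix (d : PySem.Dict StT (Int × List StT)) : PySem.Dict StT (Int × List StT) × Bool :=
  d.items.foldl (fun acc e =>
    e.2.2.foldl (fun acc2 st =>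
      if acc2.1.contains st then acc2
      else (acc2.1.insert st (e.2.1 + 1, neighborsB st.1 st.2), true)) acc) (d, false)

-- the while-changed loop; fuel (a proven-sufficient bound on the number of
-- sweeps — each sweep but the last discovers at least one new state) is only
-- a totality guard
def loopFix : Nat → PySem.Dict StT (Int × List StT) → Option (PySem.Dict StT (Int × List StT))
  | 0, _ => none
  | fuel + 1, d =>
    let step := roundFix d
    if step.2 then loopFix fuel step.1 else some step.1

def extractMin (d : PySem.Dict StT (Int × List StT)) : Option Int :=
  let goals := (d.items.filter (fun e => e.1.2.all (fun p => p == ((3 : Int), (3 : Int))))).map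
    (fun e => e.2.1)
  if goals.isEmpty then none else PySem.List.min? goals (fun v => v)

def bfs_alt (current_pairs_tuple : List (Int × Int)) : Option Int :=
  ((loopFix (4 * ((4 + 2 * current_pairs_tuple.length) ^ 2) ^ current_pairs_tuple.length + 2)
      (PySem.Dict.mk [(((0 : Int), current_pairs_tuple),
        ((0 : Int), neighborsB 0 current_pairs_tuple))])).map extractMin).getD none

-- ===== PRECONDITION & SPEC =====
def Spec_bfs (current_pairs_tuple : List (Int × Int)) (out : Option Int) : Prop := out = bfs_alt current_pairs_tuple
instance (current_pairs_tuple : List (Int × Int)) (out : Option Int) : Decidable (Spec_bfs current_pairs_tuple out) := by unfold Spec_bfs; infer_instance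

-- ===== CLAIM (what is proved, stated in full; the proofs are below) =====
def Claim_equal_bfs : Prop := ∀ (current_pairs_tuple : List (Int × Int)), Dom_bfs current_pairs_tuple → Spec_bfs current_pairs_tuple (bfs current_pairs_tuple)


-- ===== LEMMAS AND PROOFS =====

-- one dedupe step of the reference level-synchronous expansion
def dstep (acc : List StT × PySem.Set StT) (n : StT) : List StT × PySem.Set StT :=
  if PySem.Set.contains acc.2 n then acc else (acc.1 ++ [n], PySem.Set.add acc.2 n)

def tagQ (cnt : Int) (st : StT) : Int × List (Int × Int) × Int := (st.1, st.2, cnt)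

def candsOf (ps : List (Int × Int)) (ne : Int) (moves : List (List (Int × Char))) : List StT :=
  (moves.filter (fun mv => !willExplode (sortPairs (applyCombo ps ne mv)))).map
    (fun mv => (ne, sortPairs (applyCombo ps ne mv)))

def movesB (items : List (Int × Char)) : List (List (Int × Char)) :=
  items.map (fun it => [it]) ++ pairsOf items

def pendFold (pending : List StT) (acc : List StT × PySem.Set StT) : List StT × PySem.Set StT :=
  pending.foldl (fun acc st =>
    (neighborsB st.1 st.2).foldl (fun acc n =>
      if PySem.Set.contains acc.2 n then acc
      else (acc.1 ++ [n], PySem.Set.add acc.2 n)) acc) acc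

def expandLevel (frontier : List StT) (seen : PySem.Set StT) :
    List StT × PySem.Set StT :=
  pendFold frontier ([], seen)

-- reference level-synchronous BFS, proof-internal middle point between the
-- two ports (fuel = bound on the number of levels)
def loopLevel : Nat → List StT → Int → PySem.Set StT → Option (Option Int)
  | 0, _, _, _ => none
  | _ + 1, [], _, _ => some none
  | fuel + 1, st :: fr, cnt, seen =>
    if (st :: fr).any (fun s => s.2.all (fun p => p == ((3 : Int), (3 : Int)))) then some (some cnt)
    else
      let step := expandLevel (st :: fr) seen
      loopLevel fuel step.1 (cnt + 1) step.2

lemma expandLevel_eq (fr : List StT) (s : PySem.Set StT) : expandLevel fr s = pendFold fr ([], s) := rfl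

lemma pendFold_eq_dstep (pending : List StT) (acc : List StT × PySem.Set StT) :
    pendFold pending acc = pending.foldl (fun acc st => (neighborsB st.1 st.2).foldl dstep acc) acc := rfl

lemma combos_two (items : List (Int × Char)) :
    PySem.List.combinations items 2 = pairsOf items := by
  induction items with
  | nil => simp [PySem.List.combinations_nil_succ, pairsOf]
  | cons x xs ih =>
    rw [PySem.List.combinations_cons_succ, PySem.List.combinations_one, ih]
    simp [pairsOf, List.map_map]

lemma guard_combos {β : Type} (items : List (Int × Char)) (k : Nat) (g : β → List (Int × Char) → β) (acc : β) :
    (if items.length < k then acc else (PySem.List.combinations items k).foldl g acc)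
      = (PySem.List.combinations items k).foldl g acc := by
  split_ifs with h
  · rw [PySem.List.combinations_eq_nil_of_length_lt items h]
    rfl
  · rfl

lemma dstep_shift (l : List StT) (a : List StT) (s : PySem.Set StT) :
    l.foldl dstep (a, s) = (a ++ (l.foldl dstep ([], s)).1, (l.foldl dstep ([], s)).2) := by
  induction l generalizing a s with
  | nil => simp
  | cons n l ih =>
    simp only [List.foldl_cons]
    by_cases h : PySem.Set.contains s n
    · simp only [dstep, h, if_true]
      exact ih a s
    · simp only [dstep, h, if_false, Bool.false_eq_true, List.nil_append]
      rw [ih (a ++ [n]), ih [n]]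
      simp

-- named forms (definitionally equal to the inline loop bodies of the ports)
def Abody (ps : List (Int × Int)) (ne cnt : Int)
    (acc : List (Int × List (Int × Int) × Int) × PySem.Set StT) (combo : List (Int × Char)) :
    List (Int × List (Int × Int) × Int) × PySem.Set StT :=
  let np := sortPairs (applyCombo ps ne combo)
  if willExplode np then acc
  else if PySem.Set.contains acc.2 (ne, np) then acc
  else (acc.1 ++ [(ne, np, cnt + 1)], PySem.Set.add acc.2 (ne, np))

def AStep (e : Int) (ps : List (Int × Int)) (cnt : Int) (seen : PySem.Set StT) :
    List (Int × List (Int × Int) × Int) × PySem.Set StT :=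
  [e - 1, e + 1].foldl (fun acc ne =>
    if 0 ≤ ne ∧ ne ≤ 3 then
      ([1, 2] : List Nat).foldl (fun acc k =>
        if (itemsOnFloor e ps).length < k then acc
        else (PySem.List.combinations (itemsOnFloor e ps) k).foldl (Abody ps ne cnt) acc) acc
    else acc) ([], seen)

def Bbody (ps : List (Int × Int)) (ne : Int) (out : List StT) (mv : List (Int × Char)) : List StT :=
  let np := sortPairs (applyCombo ps ne mv)
  if !willExplode np then out ++ [(ne, np)] else out

lemma A_combofold (ps : List (Int × Int)) (ne : Int) (cnt : Int) :
    ∀ (moves : List (List (Int × Char))) (q0 : List (Int × List (Int × Int) × Int)) (s0 : PySem.Set StT),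
    moves.foldl (Abody ps ne cnt) (q0, s0)
    = (q0 ++ ((candsOf ps ne moves).foldl dstep ([], s0)).1.map (tagQ (cnt + 1)),
       ((candsOf ps ne moves).foldl dstep ([], s0)).2) := by
  intro moves
  induction moves with
  | nil => intro q0 s0; simp [candsOf]
  | cons mv moves ih =>
    intro q0 s0
    simp only [List.foldl_cons]
    by_cases hex : willExplode (sortPairs (applyCombo ps ne mv))
    · have hc : candsOf ps ne (mv :: moves) = candsOf ps ne moves := by
        simp [candsOf, hex]
      rw [hc, show Abody ps ne cnt (q0, s0) mv = (q0, s0) by simp [Abody, hex]]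
      exact ih q0 s0
    · have hc : candsOf ps ne (mv :: moves)
          = (ne, sortPairs (applyCombo ps ne mv)) :: candsOf ps ne moves := by
        simp [candsOf, hex]
      rw [hc]
      simp only [List.foldl_cons]
      by_cases hs : PySem.Set.contains s0 (ne, sortPairs (applyCombo ps ne mv))
      · rw [show dstep ([], s0) (ne, sortPairs (applyCombo ps ne mv)) = ([], s0) by
            simp [dstep, (PySem.Set.contains_iff _ _).mp hs],
          show Abody ps ne cnt (q0, s0) mv = (q0, s0) by
            simp [Abody, hex, (PySem.Set.contains_iff _ _).mp hs]]
        exact ih q0 s0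
      · have hx : (ne, sortPairs (applyCombo ps ne mv)) ∉ s0 :=
          fun hmem => hs ((PySem.Set.contains_iff _ _).mpr hmem)
        rw [show dstep ([], s0) (ne, sortPairs (applyCombo ps ne mv))
            = ([(ne, sortPairs (applyCombo ps ne mv))],
               PySem.Set.add s0 (ne, sortPairs (applyCombo ps ne mv))) by simp [dstep, hx],
          show Abody ps ne cnt (q0, s0) mv
            = (q0 ++ [(ne, sortPairs (applyCombo ps ne mv), cnt + 1)],
               PySem.Set.add s0 (ne, sortPairs (applyCombo ps ne mv))) by simp [Abody, hex, hx],
          dstep_shift (candsOf ps ne moves) [(ne, sortPairs (applyCombo ps ne mv))],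
          ih (q0 ++ [(ne, sortPairs (applyCombo ps ne mv), cnt + 1)])]
        simp [tagQ]

lemma B_ne (ps : List (Int × Int)) (items : List (Int × Char)) (ne : Int)
    (out : List StT) :
    (movesB items).foldl (Bbody ps ne) out
      = out ++ candsOf ps ne (movesB items) := by
  induction movesB items generalizing out with
  | nil => simp [candsOf]
  | cons mv moves ih =>
    simp only [List.foldl_cons]
    by_cases hex : willExplode (sortPairs (applyCombo ps ne mv))
    · rw [show Bbody ps ne out mv = out by simp [Bbody, hex], ih]
      simp [candsOf, hex]
    · rw [show Bbody ps ne out mv = out ++ [(ne, sortPairs (applyCombo ps ne mv))] by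
          simp [Bbody, hex], ih]
      simp [candsOf, hex, List.append_assoc]

lemma neighborsB_eq (e : Int) (ps : List (Int × Int)) :
    neighborsB e ps =
      (if 0 ≤ e - 1 ∧ e - 1 ≤ 3 then candsOf ps (e - 1) (movesB (itemsOnFloor e ps)) else []) ++
      (if 0 ≤ e + 1 ∧ e + 1 ≤ 3 then candsOf ps (e + 1) (movesB (itemsOnFloor e ps)) else []) := by
  have h0 : neighborsB e ps = [e - 1, e + 1].foldl (fun out ne =>
      if 0 ≤ ne ∧ ne ≤ 3 then (movesB (itemsOnFloor e ps)).foldl (Bbody ps ne) out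
      else out) [] := rfl
  rw [h0]
  simp only [List.foldl_cons, List.foldl_nil]
  split_ifs with h1 h2 h2 <;> simp [B_ne]

def ANe (ps : List (Int × Int)) (items : List (Int × Char)) (ne cnt : Int)
    (acc : List (Int × List (Int × Int) × Int) × PySem.Set StT) :
    List (Int × List (Int × Int) × Int) × PySem.Set StT :=
  if 0 ≤ ne ∧ ne ≤ 3 then
    ([1, 2] : List Nat).foldl (fun acc k =>
      if items.length < k then acc
      else (PySem.List.combinations items k).foldl (Abody ps ne cnt) acc) acc
  else acc

lemma A_ne (ps : List (Int × Int)) (items : List (Int × Char)) (ne cnt : Int)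
    (q0 : List (Int × List (Int × Int) × Int)) (s0 : PySem.Set StT) :
    ANe ps items ne cnt (q0, s0)
    = (q0 ++ (((if 0 ≤ ne ∧ ne ≤ 3 then candsOf ps ne (movesB items) else []).foldl dstep ([], s0)).1).map (tagQ (cnt + 1)),
       ((if 0 ≤ ne ∧ ne ≤ 3 then candsOf ps ne (movesB items) else []).foldl dstep ([], s0)).2) := by
  unfold ANe
  split_ifs with h
  · simp only [List.foldl_cons, List.foldl_nil]
    rw [guard_combos, guard_combos, ← List.foldl_append,
      PySem.List.combinations_one items, combos_two items]
    exact A_combofold ps ne cnt (movesB items) q0 s0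
  · simp

lemma A_expand (e : Int) (ps : List (Int × Int)) (cnt : Int)
    (rest : List (Int × List (Int × Int) × Int)) (seen : PySem.Set StT) (fuel : Nat) :
    loopA (fuel + 1) ((e, ps, cnt) :: rest) seen =
      if ps.all (fun p => p == ((3 : Int), (3 : Int))) then some (some cnt)
      else loopA fuel (rest ++ ((neighborsB e ps).foldl dstep ([], seen)).1.map (tagQ (cnt + 1)))
              ((neighborsB e ps).foldl dstep ([], seen)).2 := by
  have h0 : loopA (fuel + 1) ((e, ps, cnt) :: rest) seen
      = (if ps.all (fun p => p == ((3 : Int), (3 : Int))) then some (some cnt)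
         else loopA fuel (rest ++ (AStep e ps cnt seen).1) (AStep e ps cnt seen).2) := rfl
  rw [h0]
  by_cases hg : ps.all (fun p => p == ((3 : Int), (3 : Int)))
  · simp [hg]
  · simp only [hg, if_false, Bool.false_eq_true]
    have hstep : AStep e ps cnt seen
        = (((neighborsB e ps).foldl dstep ([], seen)).1.map (tagQ (cnt + 1)),
           ((neighborsB e ps).foldl dstep ([], seen)).2) := by
      rw [neighborsB_eq]
      have hA : AStep e ps cnt seen
          = ANe ps (itemsOnFloor e ps) (e + 1) cnt
              (ANe ps (itemsOnFloor e ps) (e - 1) cnt ([], seen)) := rfl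
      rw [hA, A_ne, A_ne, List.foldl_append,
        dstep_shift (if 0 ≤ e + 1 ∧ e + 1 ≤ 3 then candsOf ps (e + 1) (movesB (itemsOnFloor e ps)) else [])
          ((if 0 ≤ e - 1 ∧ e - 1 ≤ 3 then candsOf ps (e - 1) (movesB (itemsOnFloor e ps)) else []).foldl dstep ([], seen)).1]
      simp [List.map_append]
    rw [hstep]

lemma levelA (cnt : Int) :
    ∀ (pending nxt : List StT) (s : PySem.Set StT) (f : Nat), pending.length ≤ f →
    loopA f (pending.map (tagQ cnt) ++ nxt.map (tagQ (cnt + 1))) s =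
      if pending.any (fun st => st.2.all (fun p => p == ((3 : Int), (3 : Int)))) then some (some cnt)
      else loopA (f - pending.length) ((pendFold pending (nxt, s)).1.map (tagQ (cnt + 1)))
              (pendFold pending (nxt, s)).2 := by
  intro pending
  induction pending with
  | nil =>
    intro nxt s f _
    simp [pendFold]
  | cons st pending ih =>
    intro nxt s f hf
    match f, hf with
    | f + 1, hf =>
      obtain ⟨e, ps⟩ := st
      have hq : ((e, ps) :: pending).map (tagQ cnt) ++ nxt.map (tagQ (cnt + 1))
          = (e, ps, cnt) :: (pending.map (tagQ cnt) ++ nxt.map (tagQ (cnt + 1))) := by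
        simp [tagQ]
      rw [hq, A_expand]
      have hpf : pendFold ((e, ps) :: pending) (nxt, s)
          = pendFold pending (nxt ++ ((neighborsB e ps).foldl dstep ([], s)).1,
              ((neighborsB e ps).foldl dstep ([], s)).2) := by
        rw [pendFold_eq_dstep, pendFold_eq_dstep, List.foldl_cons,
          dstep_shift (neighborsB e ps) nxt s]
      by_cases hg : ps.all (fun p => p == ((3 : Int), (3 : Int)))
      · simp [hg]
      · simp only [hg, if_false, Bool.false_eq_true]
        rw [show (pending.map (tagQ cnt) ++ nxt.map (tagQ (cnt + 1))) ++
              ((neighborsB e ps).foldl dstep ([], s)).1.map (tagQ (cnt + 1))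
            = pending.map (tagQ cnt)
              ++ (nxt ++ ((neighborsB e ps).foldl dstep ([], s)).1).map (tagQ (cnt + 1)) by
            simp [List.map_append]]
        have hlen : pending.length ≤ f := by
          simp only [List.length_cons] at hf; omega
        rw [ih (nxt ++ ((neighborsB e ps).foldl dstep ([], s)).1)
            ((neighborsB e ps).foldl dstep ([], s)).2 f hlen, hpf]
        have hg' : (ps.all fun p => p == ((3 : Int), (3 : Int))) = false :=
          Bool.eq_false_iff.mpr hg
        simp only [List.any_cons, hg', Bool.false_or, List.length_cons, Nat.succ_sub_succ]

-- ---- validity of reachable states and the cardinality bound (fuel sufficiency) ----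

def ValidSt (n : Nat) (W : List Int) (st : StT) : Prop :=
  st.1 ∈ ([0, 1, 2, 3] : List Int) ∧ st.2.length = n ∧ ∀ p ∈ st.2, p.1 ∈ W ∧ p.2 ∈ W

lemma pyGetD_mem_or {α : Type} (xs : List α) (i : Int) (d : α) :
    PySem.List.pyGetD xs i d ∈ xs ∨ PySem.List.pyGetD xs i d = d := by
  simp only [PySem.List.pyGetD, PySem.List.pyGet?]
  rcases PySem.List.pyIdx? xs.length i with _ | k
  · simp
  · simp only [Option.bind_some]
    rcases h : xs[k]? with _ | v
    · simp
    · exact Or.inl (by simp [List.mem_of_getElem? h])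

lemma pySetD_facts {α : Type} (np : List α) (i : Int) (v : α) :
    ((PySem.List.pySet? np i v).getD np).length = np.length ∧
    ∀ p ∈ (PySem.List.pySet? np i v).getD np, p ∈ np ∨ p = v := by
  simp only [PySem.List.pySet?]
  rcases PySem.List.pyIdx? np.length i with _ | k
  · exact ⟨rfl, fun p hp => Or.inl hp⟩
  · simp only [Option.map_some, Option.getD_some]
    exact ⟨by simp, fun p hp => List.mem_or_eq_of_mem_set hp⟩

lemma applyCombo_facts (W : List Int) (h0 : (0 : Int) ∈ W) (ne : Int) (hne : ne ∈ W) :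
    ∀ (combo : List (Int × Char)) (ps : List (Int × Int)),
      (∀ p ∈ ps, p.1 ∈ W ∧ p.2 ∈ W) →
      (applyCombo ps ne combo).length = ps.length ∧
      ∀ p ∈ applyCombo ps ne combo, p.1 ∈ W ∧ p.2 ∈ W := by
  intro combo
  induction combo with
  | nil => exact fun ps hW => ⟨rfl, hW⟩
  | cons it combo ih =>
    intro ps hW
    have hgc : (PySem.List.pyGetD ps it.1 ((0 : Int), (0 : Int))).1 ∈ W ∧
        (PySem.List.pyGetD ps it.1 ((0 : Int), (0 : Int))).2 ∈ W := by
      rcases pyGetD_mem_or ps it.1 ((0 : Int), (0 : Int)) with h | h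
      · exact hW _ h
      · rw [h]; exact ⟨h0, h0⟩
    have hvW : (if it.2 == 'G' then (ne, (PySem.List.pyGetD ps it.1 ((0 : Int), (0 : Int))).2)
          else ((PySem.List.pyGetD ps it.1 ((0 : Int), (0 : Int))).1, ne)).1 ∈ W ∧
        (if it.2 == 'G' then (ne, (PySem.List.pyGetD ps it.1 ((0 : Int), (0 : Int))).2)
          else ((PySem.List.pyGetD ps it.1 ((0 : Int), (0 : Int))).1, ne)).2 ∈ W := by
      split_ifs
      · exact ⟨hne, hgc.2⟩
      · exact ⟨hgc.1, hne⟩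
    obtain ⟨hl, hm⟩ := pySetD_facts ps it.1
      (if it.2 == 'G' then (ne, (PySem.List.pyGetD ps it.1 ((0 : Int), (0 : Int))).2)
        else ((PySem.List.pyGetD ps it.1 ((0 : Int), (0 : Int))).1, ne))
    have hstep : applyCombo ps ne (it :: combo)
        = applyCombo ((PySem.List.pySet? ps it.1
            (if it.2 == 'G' then (ne, (PySem.List.pyGetD ps it.1 ((0 : Int), (0 : Int))).2)
              else ((PySem.List.pyGetD ps it.1 ((0 : Int), (0 : Int))).1, ne))).getD ps) ne combo := rfl
    have hW' : ∀ p ∈ (PySem.List.pySet? ps it.1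
        (if it.2 == 'G' then (ne, (PySem.List.pyGetD ps it.1 ((0 : Int), (0 : Int))).2)
          else ((PySem.List.pyGetD ps it.1 ((0 : Int), (0 : Int))).1, ne))).getD ps,
        p.1 ∈ W ∧ p.2 ∈ W := by
      intro p hp
      rcases hm p hp with h | h
      · exact hW p h
      · rw [h]; exact hvW
    obtain ⟨ih1, ih2⟩ := ih _ hW'
    exact ⟨by rw [hstep, ih1, hl], by rw [hstep]; exact ih2⟩

lemma neighborsB_valid (n : Nat) (W : List Int)
    (h03 : ∀ i : Int, 0 ≤ i → i ≤ 3 → i ∈ W)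
    (e : Int) (ps : List (Int × Int)) (hlen : ps.length = n)
    (hW : ∀ p ∈ ps, p.1 ∈ W ∧ p.2 ∈ W) :
    ∀ st ∈ neighborsB e ps, ValidSt n W st := by
  have h0' : (0 : Int) ∈ W := h03 0 (by omega) (by omega)
  intro st hst
  rw [neighborsB_eq] at hst
  have main : ∀ ne : Int, 0 ≤ ne ∧ ne ≤ 3 →
      st ∈ candsOf ps ne (movesB (itemsOnFloor e ps)) → ValidSt n W st := by
    intro ne hg hmem
    simp only [candsOf, List.mem_map] at hmem
    obtain ⟨mv, hmv, rfl⟩ := hmem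
    have hneW : ne ∈ W := h03 ne hg.1 hg.2
    have haf := applyCombo_facts W h0' ne hneW mv ps hW
    have hperm := PySem.List.sorted2_perm (applyCombo ps ne mv) Prod.fst Prod.snd false
    refine ⟨by simp; omega, ?_, ?_⟩
    · show (sortPairs (applyCombo ps ne mv)).length = n
      rw [sortPairs, hperm.length_eq, haf.1, hlen]
    · intro p hp
      exact haf.2 p (hperm.mem_iff.mp hp)
  rcases List.mem_append.mp hst with h | h
  · split_ifs at h with hg
    · exact main (e - 1) hg h
    · simp at h
  · split_ifs at h with hg
    · exact main (e + 1) hg h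
    · simp at h

def allPairsW (W : List Int) : List (Int × Int) := W.flatMap (fun a => W.map (fun b => (a, b)))

def allLists (W : List Int) : Nat → List (List (Int × Int))
  | 0 => [[]]
  | k + 1 => (allPairsW W).flatMap (fun p => (allLists W k).map (fun l => p :: l))

def allStates (W : List Int) (n : Nat) : List StT :=
  ([0, 1, 2, 3] : List Int).flatMap (fun e => (allLists W n).map (fun l => (e, l)))

lemma length_allPairsW (W : List Int) : (allPairsW W).length = W.length ^ 2 := by
  simp [allPairsW, List.length_flatMap, List.map_const']
  ring

lemma length_allLists (W : List Int) : ∀ k, (allLists W k).length = (W.length ^ 2) ^ k := by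
  intro k
  induction k with
  | zero => simp [allLists]
  | succ k ih =>
    simp only [allLists, List.length_flatMap]
    simp [List.map_const', ih]
    rw [length_allPairsW]
    ring

lemma length_allStates (W : List Int) (n : Nat) :
    (allStates W n).length = 4 * (W.length ^ 2) ^ n := by
  simp [allStates, length_allLists]
  ring

lemma mem_allLists (W : List Int) :
    ∀ (k : Nat) (l : List (Int × Int)), l.length = k → (∀ p ∈ l, p.1 ∈ W ∧ p.2 ∈ W) →
      l ∈ allLists W k := by
  intro k
  induction k with
  | zero => intro l h _; rw [List.length_eq_zero_iff] at h; simp [h, allLists]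
  | succ k ih =>
    intro l hlen hW
    match l with
    | [] => simp at hlen
    | p :: l =>
      simp only [allLists, List.mem_flatMap]
      refine ⟨p, ?_, List.mem_map.mpr ⟨l, ih l (by simpa using hlen) (fun q hq => hW q (by simp [hq])), rfl⟩⟩
      have hp := hW p (by simp)
      simp only [allPairsW, List.mem_flatMap]
      exact ⟨p.1, hp.1, List.mem_map.mpr ⟨p.2, hp.2, rfl⟩⟩

lemma card_le (n : Nat) (W : List Int) (s : List StT) (hnd : s.Nodup)
    (hv : ∀ st ∈ s, ValidSt n W st) : s.length ≤ 4 * (W.length ^ 2) ^ n := by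
  have hsub : s ⊆ allStates W n := by
    intro st hst
    obtain ⟨h1, h2, h3⟩ := hv st hst
    simp only [allStates, List.mem_flatMap]
    exact ⟨st.1, h1, List.mem_map.mpr ⟨st.2, mem_allLists W n st.2 h2 h3, rfl⟩⟩
  calc s.length ≤ (allStates W n).length := (List.subperm_of_subset hnd hsub).length_le
    _ = 4 * (W.length ^ 2) ^ n := length_allStates W n

lemma dfold_spec : ∀ (l : List StT) (a : List StT) (s : PySem.Set StT), ∃ news,
    l.foldl dstep (a, s) = (a ++ news, s ++ news) ∧ (∀ st ∈ news, st ∈ l) ∧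
    (s.Nodup → (s ++ news).Nodup) := by
  intro l
  induction l with
  | nil => intro a s; exact ⟨[], by simp⟩
  | cons x l ih =>
    intro a s
    simp only [List.foldl_cons]
    by_cases h : PySem.Set.contains s x
    · have hmem : x ∈ s := (PySem.Set.contains_iff s x).mp h
      have hd : dstep (a, s) x = (a, s) := by simp [dstep, hmem]
      obtain ⟨news, h1, h2, h3⟩ := ih a s
      exact ⟨news, by rw [hd]; exact h1, fun st hst => by simp [h2 st hst], h3⟩
    · have hx : x ∉ s := fun hmem => h ((PySem.Set.contains_iff s x).mpr hmem)
      have hd : dstep (a, s) x = (a ++ [x], s ++ [x]) := by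
        simp [dstep, hx]
      obtain ⟨news, h1, h2, h3⟩ := ih (a ++ [x]) (s ++ [x])
      refine ⟨x :: news, ?_, ?_, ?_⟩
      · rw [hd, h1]; simp
      · intro st hst
        rcases List.mem_cons.mp hst with h' | h'
        · simp [h']
        · simp [h2 st h']
      · intro hnd
        have hsx : (s ++ [x]).Nodup := by
          rw [List.nodup_append]
          refine ⟨hnd, List.nodup_singleton x, ?_⟩
          intro a ha b hb
          simp only [List.mem_singleton] at hb
          subst hb
          exact fun hax => hx (hax ▸ ha)
        simpa using h3 hsx

lemma pendFold_spec (n : Nat) (W : List Int)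
    (h03 : ∀ i : Int, 0 ≤ i → i ≤ 3 → i ∈ W) :
    ∀ (fr : List StT), (∀ st ∈ fr, ValidSt n W st) → ∀ (a : List StT) (s : PySem.Set StT),
    ∃ news, pendFold fr (a, s) = (a ++ news, s ++ news) ∧
      (∀ st ∈ news, ValidSt n W st) ∧ (s.Nodup → (s ++ news).Nodup) := by
  intro fr
  induction fr with
  | nil => exact fun _ a s => ⟨[], by simp [pendFold]⟩
  | cons st fr ih =>
    intro hv a s
    obtain ⟨news1, h1, h2, h3⟩ := dfold_spec (neighborsB st.1 st.2) a s
    have hvst := hv st (by simp)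
    have hvn1 : ∀ x ∈ news1, ValidSt n W x := fun x hx =>
      neighborsB_valid n W h03 st.1 st.2 hvst.2.1 hvst.2.2 x (h2 x hx)
    obtain ⟨news2, g1, g2, g3⟩ := ih (fun x hx => hv x (by simp [hx])) (a ++ news1) (s ++ news1)
    refine ⟨news1 ++ news2, ?_, ?_, ?_⟩
    · rw [pendFold_eq_dstep, List.foldl_cons, h1, ← pendFold_eq_dstep, g1]
      simp
    · intro x hx
      rcases List.mem_append.mp hx with h | h
      · exact hvn1 x h
      · exact g2 x h
    · intro hnd
      have := g3 (h3 hnd)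
      simpa using this

lemma outer (n : Nat) (W : List Int) (h03 : ∀ i : Int, 0 ≤ i → i ≤ 3 → i ∈ W) :
    ∀ (fB : Nat) (frontier : List StT) (cnt : Int) (s : PySem.Set StT) (fA : Nat),
    s.Nodup → (∀ st ∈ s, ValidSt n W st) → (∀ st ∈ frontier, ValidSt n W st) →
    2 * (4 * (W.length ^ 2) ^ n - s.length) + frontier.length + 1 ≤ fA →
    4 * (W.length ^ 2) ^ n + 2 - s.length ≤ fB →
    loopA fA (frontier.map (tagQ cnt)) s = loopLevel fB frontier cnt s := by
  intro fB
  induction fB with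
  | zero =>
    intro frontier cnt s fA hnd hvs hvf hfA hfB
    exfalso
    have hsB := card_le n W s hnd hvs
    omega
  | succ fB ih =>
    intro frontier cnt s fA hnd hvs hvf hfA hfB
    match frontier with
    | [] =>
      match fA, hfA with
      | fA + 1, _ => rfl
    | st :: fr =>
      have hsB0 := card_le n W s hnd hvs
      have hq : (st :: fr).map (tagQ cnt)
          = (st :: fr).map (tagQ cnt) ++ ([] : List StT).map (tagQ (cnt + 1)) := by simp
      have hlenA : (st :: fr).length ≤ fA := by
        simp only [List.length_cons] at hfA ⊢; omega
      rw [hq, levelA cnt (st :: fr) [] s fA hlenA]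
      have hB : loopLevel (fB + 1) (st :: fr) cnt s
          = (if (st :: fr).any (fun s' => s'.2.all (fun p => p == ((3 : Int), (3 : Int)))) then some (some cnt)
             else loopLevel fB (expandLevel (st :: fr) s).1 (cnt + 1) (expandLevel (st :: fr) s).2) := rfl
      rw [hB]
      by_cases hany : ((st :: fr).any (fun s' => s'.2.all (fun p => p == ((3 : Int), (3 : Int))))) = true
      · simp [hany]
      · have hany' : ((st :: fr).any (fun s' => s'.2.all (fun p => p == ((3 : Int), (3 : Int))))) = false :=
          Bool.eq_false_iff.mpr hany
        rw [hany']
        simp only [if_false, Bool.false_eq_true]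
        obtain ⟨news, hEq, hvnews, hnd'⟩ := pendFold_spec n W h03 (st :: fr) hvf [] s
        rw [expandLevel_eq, hEq]
        have hndp : (s ++ news).Nodup := hnd' hnd
        have hvsp : ∀ x ∈ s ++ news, ValidSt n W x := by
          intro x hx
          rcases List.mem_append.mp hx with h | h
          · exact hvs x h
          · exact hvnews x h
        have hsB1 := card_le n W (s ++ news) hndp hvsp
        have hlapp : (s ++ news).length = s.length + news.length := List.length_append
        match news, hvnews, hndp, hvsp, hsB1, hlapp with
        | [], _, _, _, _, _ =>
          have h1 : 1 ≤ fA - (st :: fr).length := by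
            simp only [List.length_cons] at hfA ⊢; omega
          have h2 : 1 ≤ fB := by omega
          match fA - (st :: fr).length, h1, fB, h2 with
          | m + 1, _, k + 1, _ => simp [loopA, loopLevel]
        | nw :: news', hvnews, hndp, hvsp, hsB1, hlapp =>
          simp only [List.nil_append]
          refine ih (nw :: news') (cnt + 1) (s ++ nw :: news') (fA - (st :: fr).length)
            hndp hvsp hvnews ?_ ?_
          · simp only [List.length_cons] at hfA hlapp hsB1 ⊢
            omega
          · simp only [List.length_cons] at hfB hlapp hsB1 ⊢
            omega

def WS (x : List (Int × Int)) : List Int := [0, 1, 2, 3] ++ x.flatMap (fun p => [p.1, p.2])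

lemma length_WS (x : List (Int × Int)) : (WS x).length = 4 + 2 * x.length := by
  have : ∀ y : List (Int × Int), (y.flatMap (fun p => [p.1, p.2])).length = 2 * y.length := by
    intro y
    induction y with
    | nil => simp
    | cons p y ih => simp [ih]; omega
  simp [WS, this]
  omega

-- ---- bridge from the level-synchronous BFS to B's fixpoint sweep ----

-- the new states one dstep-dedupe pass (resp. one level expansion) appends
def N (nbs : List StT) (s : PySem.Set StT) : List StT := (nbs.foldl dstep ([], s)).1
def M (fr : List StT) (s : PySem.Set StT) : List StT := (pendFold fr ([], s)).1

lemma dfold_shape (l : List StT) (a : List StT) (s : PySem.Set StT) :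
    l.foldl dstep (a, s) = (a ++ N l s, s ++ N l s) := by
  obtain ⟨news, h1, -, -⟩ := dfold_spec l [] s
  rw [dstep_shift, h1]
  simp [N, h1]

lemma N_cons (nb : StT) (nbs : List StT) (s : PySem.Set StT) :
    N (nb :: nbs) s = if nb ∈ s then N nbs s else nb :: N nbs (s ++ [nb]) := by
  by_cases h : nb ∈ s
  · simp only [h, if_true]
    unfold N
    simp only [List.foldl_cons]
    rw [show dstep ([], s) nb = ([], s) by simp [dstep, h]]
  · simp only [h, if_false]
    unfold N
    simp only [List.foldl_cons]
    rw [show dstep ([], s) nb = ([nb], s ++ [nb]) by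
        simp [dstep, h],
      dstep_shift nbs [nb] (s ++ [nb])]
    rfl

lemma mem_s_N : ∀ (nbs : List StT) (s : PySem.Set StT) (nb : StT), nb ∈ nbs → nb ∈ s ++ N nbs s := by
  intro nbs
  induction nbs with
  | nil => intro s nb h; simp at h
  | cons nb' nbs ih =>
    intro s nb h
    rw [N_cons]
    by_cases h' : nb' ∈ s
    · simp only [h', if_true]
      rcases List.mem_cons.mp h with rfl | h2
      · simp [h']
      · exact ih s nb h2
    · simp only [h', if_false]
      rcases List.mem_cons.mp h with rfl | h2
      · simp
      · have := ih (s ++ [nb']) nb h2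
        simp only [List.mem_append, List.mem_singleton] at this ⊢
        simp only [List.mem_cons]
        tauto

lemma pend_shape : ∀ (fr : List StT) (s : PySem.Set StT) (a : List StT),
    pendFold fr (a, s) = (a ++ M fr s, s ++ M fr s) := by
  intro fr
  induction fr with
  | nil => intro s a; simp [pendFold, M]
  | cons st fr ih =>
    intro s a
    have h1 : pendFold (st :: fr) (a, s)
        = pendFold fr ((neighborsB st.1 st.2).foldl dstep (a, s)) := rfl
    have h1' : pendFold (st :: fr) ([], s)
        = pendFold fr ((neighborsB st.1 st.2).foldl dstep ([], s)) := rfl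
    have h2 : M (st :: fr) s
        = N (neighborsB st.1 st.2) s ++ M fr (s ++ N (neighborsB st.1 st.2) s) := by
      unfold M
      rw [h1', dfold_shape, ih]
      simp [M]
    rw [h1, dfold_shape, ih, h2]
    simp

lemma M_cons (st : StT) (fr : List StT) (s : PySem.Set StT) :
    M (st :: fr) s = N (neighborsB st.1 st.2) s ++ M fr (s ++ N (neighborsB st.1 st.2) s) := by
  unfold M
  rw [show pendFold (st :: fr) ([], s)
      = pendFold fr ((neighborsB st.1 st.2).foldl dstep ([], s)) from rfl,
    dfold_shape, pend_shape]
  simp [M]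

lemma closure_M : ∀ (fr : List StT) (s : PySem.Set StT) (st : StT), st ∈ fr →
    ∀ nb ∈ neighborsB st.1 st.2, nb ∈ s ++ M fr s := by
  intro fr
  induction fr with
  | nil => intro s st h; simp at h
  | cons st' fr ih =>
    intro s st h nb hnb
    rw [M_cons]
    rcases List.mem_cons.mp h with rfl | h2
    · have := mem_s_N (neighborsB st.1 st.2) s nb hnb
      simp only [List.mem_append] at this ⊢
      tauto
    · have := ih (s ++ N (neighborsB st'.1 st'.2) s) st h2 nb hnb
      simp only [List.mem_append] at this ⊢
      tauto

-- dict-side counterparts (B's sweep); tagD is the entry B stores for a state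
def tagD (k : Int) (st : StT) : StT × (Int × List StT) := (st, (k, neighborsB st.1 st.2))

def dstepD (v : Int) (acc : PySem.Dict StT (Int × List StT) × Bool) (nb : StT) :
    PySem.Dict StT (Int × List StT) × Bool :=
  if acc.1.contains nb then acc else (acc.1.insert nb (v, neighborsB nb.1 nb.2), true)

def bigstep (acc : PySem.Dict StT (Int × List StT) × Bool) (e : StT × (Int × List StT)) :
    PySem.Dict StT (Int × List StT) × Bool :=
  e.2.2.foldl (dstepD (e.2.1 + 1)) acc

lemma roundFix_eq_foldl (d : PySem.Dict StT (Int × List StT)) :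
    roundFix d = d.items.foldl bigstep (d, false) := rfl

lemma inner_noop (v : Int) : ∀ (nbs : List StT) (d : PySem.Dict StT (Int × List StT)) (b : Bool),
    (∀ nb ∈ nbs, nb ∈ d.keys) → nbs.foldl (dstepD v) (d, b) = (d, b) := by
  intro nbs
  induction nbs with
  | nil => intro d b _; rfl
  | cons nb nbs ih =>
    intro d b h
    have hc : d.contains nb = true :=
      (PySem.Dict.contains_iff_mem_keys d nb).mpr (h nb (by simp))
    rw [List.foldl_cons, show dstepD v (d, b) nb = (d, b) by simp [dstepD, hc]]
    exact ih d b (fun x hx => h x (by simp [hx]))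

lemma inner_corr (v : Int) : ∀ (nbs : List StT) (d : PySem.Dict StT (Int × List StT)) (b : Bool),
    nbs.foldl (dstepD v) (d, b)
      = (PySem.Dict.mk (d.items ++ (N nbs d.keys).map (fun st => (st, (v, neighborsB st.1 st.2)))),
         b || !(N nbs d.keys).isEmpty) := by
  intro nbs
  induction nbs with
  | nil => intro d b; simp [N]
  | cons nb nbs ih =>
    intro d b
    by_cases h : nb ∈ d.keys
    · have hc : d.contains nb = true := (PySem.Dict.contains_iff_mem_keys d nb).mpr h
      rw [List.foldl_cons, show dstepD v (d, b) nb = (d, b) by simp [dstepD, hc],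
        ih, N_cons]
      simp [h]
    · have hc : d.contains nb = false := by
        rw [Bool.eq_false_iff]
        exact fun hh => h ((PySem.Dict.contains_iff_mem_keys d nb).mp hh)
      rw [List.foldl_cons,
        show dstepD v (d, b) nb = (d.insert nb (v, neighborsB nb.1 nb.2), true) by
          simp [dstepD, hc],
        ih, N_cons,
        PySem.Dict.items_insert_of_not_contains d (v, neighborsB nb.1 nb.2) hc,
        PySem.Dict.keys_insert_of_not_contains d (v, neighborsB nb.1 nb.2) hc]
      simp [h]

lemma entries_noop : ∀ (P : List (StT × (Int × List StT))) (d : PySem.Dict StT (Int × List StT)) (b : Bool),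
    (∀ e ∈ P, ∀ nb ∈ e.2.2, nb ∈ d.keys) → P.foldl bigstep (d, b) = (d, b) := by
  intro P
  induction P with
  | nil => intro d b _; rfl
  | cons e P ih =>
    intro d b h
    rw [List.foldl_cons,
      show bigstep (d, b) e = (d, b) from inner_noop (e.2.1 + 1) e.2.2 d b (h e (by simp))]
    exact ih d b (fun x hx => h x (by simp [hx]))

lemma not_isEmpty_append {α : Type} (l m : List α) :
    (!(l ++ m).isEmpty) = (!l.isEmpty || !m.isEmpty) := by
  cases l <;> simp

lemma entries_active : ∀ (fr : List StT) (cnt : Int) (d : PySem.Dict StT (Int × List StT)) (b : Bool),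
    (fr.map (tagD cnt)).foldl bigstep (d, b)
      = (PySem.Dict.mk (d.items ++ (M fr d.keys).map (tagD (cnt + 1))),
         b || !(M fr d.keys).isEmpty) := by
  intro fr
  induction fr with
  | nil => intro cnt d b; simp [M, pendFold]
  | cons st fr ih =>
    intro cnt d b
    rw [List.map_cons, List.foldl_cons,
      show bigstep (d, b) (tagD cnt st)
        = (neighborsB st.1 st.2).foldl (dstepD (cnt + 1)) (d, b) from rfl,
      inner_corr, ih, M_cons]
    have hkeys : (PySem.Dict.mk (d.items ++
        (N (neighborsB st.1 st.2) d.keys).map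
          (fun st' => (st', (cnt + 1, neighborsB st'.1 st'.2))))).keys
        = d.keys ++ N (neighborsB st.1 st.2) d.keys := by
      show (d.items ++ _).map Prod.fst = _
      rw [List.map_append, List.map_map,
        show ((Prod.fst ∘ fun st' : StT => (st', (cnt + 1, neighborsB st'.1 st'.2)))
            = fun st' : StT => st') from rfl]
      rw [List.map_id']
      rfl
    rw [hkeys]
    have hitems : (PySem.Dict.mk (d.items ++
        (N (neighborsB st.1 st.2) d.keys).map
          (fun st' => (st', (cnt + 1, neighborsB st'.1 st'.2))))).items
        = d.items ++ (N (neighborsB st.1 st.2) d.keys).map (tagD (cnt + 1)) := rfl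
    rw [hitems]
    rw [not_isEmpty_append]
    simp [List.append_assoc, Bool.or_assoc]

lemma roundFix_level (Dpre : List (StT × (Int × List StT))) (fr : List StT) (cnt : Int)
    (d : PySem.Dict StT (Int × List StT))
    (hitems : d.items = Dpre ++ fr.map (tagD cnt))
    (hclosed : ∀ e ∈ Dpre, ∀ nb ∈ e.2.2, nb ∈ d.keys) :
    roundFix d = (PySem.Dict.mk (d.items ++ (M fr d.keys).map (tagD (cnt + 1))),
      !(M fr d.keys).isEmpty) := by
  rw [roundFix_eq_foldl, hitems, List.foldl_append, entries_noop Dpre d false hclosed,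
    entries_active fr cnt d false]
  rw [Bool.false_or, hitems]

lemma keys_of_level (Dpre : List (StT × (Int × List StT))) (fr : List StT) (cnt : Int) :
    (PySem.Dict.mk (Dpre ++ fr.map (tagD cnt))).keys = Dpre.map Prod.fst ++ fr := by
  show (Dpre ++ fr.map (tagD cnt)).map Prod.fst = _
  rw [List.map_append, List.map_map,
    show (Prod.fst ∘ tagD cnt) = fun st : StT => st from rfl, List.map_id']

lemma fix_run (n : Nat) (W : List Int) (h03 : ∀ i : Int, 0 ≤ i → i ≤ 3 → i ∈ W) :
    ∀ (fF : Nat) (Dpre : List (StT × (Int × List StT))) (fr : List StT) (cnt : Int),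
    (Dpre.map Prod.fst ++ fr).Nodup →
    (∀ st ∈ Dpre.map Prod.fst ++ fr, ValidSt n W st) →
    (∀ e ∈ Dpre, ∀ nb ∈ e.2.2, nb ∈ Dpre.map Prod.fst ++ fr) →
    4 * (W.length ^ 2) ^ n + 2 - (Dpre.map Prod.fst ++ fr).length ≤ fF →
    ∃ ext, loopFix fF (PySem.Dict.mk (Dpre ++ fr.map (tagD cnt)))
        = some (PySem.Dict.mk ((Dpre ++ fr.map (tagD cnt)) ++ ext))
      ∧ ∀ e ∈ ext, cnt < e.2.1 := by
  intro fF
  induction fF with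
  | zero =>
    intro Dpre fr cnt hnd hv hclosed hf
    exfalso
    have := card_le n W (Dpre.map Prod.fst ++ fr) hnd hv
    omega
  | succ fF ih =>
    intro Dpre fr cnt hnd hv hclosed hf
    have hkeys := keys_of_level Dpre fr cnt
    have hround := roundFix_level Dpre fr cnt (PySem.Dict.mk (Dpre ++ fr.map (tagD cnt))) rfl
      (by intro e he nb hnb; rw [hkeys]; exact hclosed e he nb hnb)
    rw [hkeys] at hround
    have hstep : loopFix (fF + 1) (PySem.Dict.mk (Dpre ++ fr.map (tagD cnt)))
        = (if (roundFix (PySem.Dict.mk (Dpre ++ fr.map (tagD cnt)))).2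
           then loopFix fF (roundFix (PySem.Dict.mk (Dpre ++ fr.map (tagD cnt)))).1
           else some (roundFix (PySem.Dict.mk (Dpre ++ fr.map (tagD cnt)))).1) := rfl
    rw [hstep,
      show (roundFix (PySem.Dict.mk (Dpre ++ fr.map (tagD cnt)))).2
        = !(M fr (Dpre.map Prod.fst ++ fr)).isEmpty from by rw [hround],
      show (roundFix (PySem.Dict.mk (Dpre ++ fr.map (tagD cnt)))).1
        = PySem.Dict.mk ((Dpre ++ fr.map (tagD cnt))
            ++ (M fr (Dpre.map Prod.fst ++ fr)).map (tagD (cnt + 1))) from by rw [hround]]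
    by_cases hLe : (M fr (Dpre.map Prod.fst ++ fr)).isEmpty
    · have hLnil : M fr (Dpre.map Prod.fst ++ fr) = [] := List.isEmpty_iff.mp hLe
      refine ⟨[], ?_, by simp⟩
      rw [hLnil]
      simp
    · have hflag : (!(M fr (Dpre.map Prod.fst ++ fr)).isEmpty) = true := by simp [hLe]
      rw [if_pos hflag]
      have hvfr : ∀ st ∈ fr, ValidSt n W st := fun st hst => hv st (by simp [hst])
      obtain ⟨news, hp1, hp2, hp3⟩ :=
        pendFold_spec n W h03 fr hvfr [] (Dpre.map Prod.fst ++ fr)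
      have hnews : news = M fr (Dpre.map Prod.fst ++ fr) := by
        have := (pend_shape fr (Dpre.map Prod.fst ++ fr) []).symm.trans hp1
        simpa using (congrArg Prod.fst this).symm
      subst hnews
      have hmapfst : (Dpre ++ fr.map (tagD cnt)).map Prod.fst = Dpre.map Prod.fst ++ fr := by
        have := keys_of_level Dpre fr cnt
        exact this
      have hclosed' : ∀ e ∈ Dpre ++ fr.map (tagD cnt), ∀ nb ∈ e.2.2,
          nb ∈ (Dpre ++ fr.map (tagD cnt)).map Prod.fst ++ M fr (Dpre.map Prod.fst ++ fr) := by
        intro e he nb hnb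
        rw [hmapfst]
        rcases List.mem_append.mp he with h | h
        · exact List.mem_append.mpr (Or.inl (hclosed e h nb hnb))
        · obtain ⟨st, hst, rfl⟩ := List.mem_map.mp h
          exact closure_M fr (Dpre.map Prod.fst ++ fr) st hst nb hnb
      have hnd' : ((Dpre ++ fr.map (tagD cnt)).map Prod.fst
          ++ M fr (Dpre.map Prod.fst ++ fr)).Nodup := by
        rw [hmapfst]; exact hp3 hnd
      have hv' : ∀ st ∈ (Dpre ++ fr.map (tagD cnt)).map Prod.fst
          ++ M fr (Dpre.map Prod.fst ++ fr), ValidSt n W st := by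
        rw [hmapfst]
        intro st hst
        rcases List.mem_append.mp hst with h | h
        · exact hv st h
        · exact hp2 st h
      have hlen' : 4 * (W.length ^ 2) ^ n + 2
          - ((Dpre ++ fr.map (tagD cnt)).map Prod.fst
             ++ M fr (Dpre.map Prod.fst ++ fr)).length ≤ fF := by
        rw [hmapfst]
        have h1 : 1 ≤ (M fr (Dpre.map Prod.fst ++ fr)).length := by
          cases hM : M fr (Dpre.map Prod.fst ++ fr) with
          | nil => rw [hM] at hLe; simp at hLe
          | cons a l => simp
        simp only [List.length_append] at hf ⊢
        omega
      obtain ⟨ext, hrun, hvext⟩ :=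
        ih (Dpre ++ fr.map (tagD cnt)) (M fr (Dpre.map Prod.fst ++ fr)) (cnt + 1)
          hnd' hv' hclosed' hlen'
      refine ⟨(M fr (Dpre.map Prod.fst ++ fr)).map (tagD (cnt + 1)) ++ ext, ?_, ?_⟩
      · refine hrun.trans ?_
        rw [List.append_assoc]
      · intro e he
        rcases List.mem_append.mp he with h | h
        · obtain ⟨st, hst, rfl⟩ := List.mem_map.mp h
          simp [tagD]
        · have := hvext e h
          omega

lemma min?_const_min (c : Int) (l : List Int) (hmem : c ∈ l) (hall : ∀ y ∈ l, c ≤ y) :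
    PySem.List.min? l (fun v => v) = some c := by
  cases hm : PySem.List.min? l (fun v => v) with
  | none =>
    rw [PySem.List.min?_eq_none_iff] at hm
    subst hm
    simp at hmem
  | some m =>
    have h1 : m ≤ c := PySem.List.min?_isMin hm c hmem
    have h2 : c ≤ m := hall m (PySem.List.min?_mem hm)
    rw [le_antisymm h1 h2]

lemma goals_extract (Dpre ext : List (StT × (Int × List StT))) (fr : List StT) (cnt : Int)
    (hgf : ∀ e ∈ Dpre, ¬ (e.1.2.all (fun q => q == ((3 : Int), (3 : Int))) = true)) :
    extractMin (PySem.Dict.mk ((Dpre ++ fr.map (tagD cnt)) ++ ext))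
      = (let goals :=
          (fr.filter (fun y => y.2.all (fun q => q == ((3 : Int), (3 : Int))))).map (fun _ => cnt)
          ++ (ext.filter (fun e => e.1.2.all (fun q => q == ((3 : Int), (3 : Int))))).map
            (fun e => e.2.1);
         if goals.isEmpty then none else PySem.List.min? goals (fun v => v)) := by
  have hitems : (PySem.Dict.mk ((Dpre ++ fr.map (tagD cnt)) ++ ext)).items
      = (Dpre ++ fr.map (tagD cnt)) ++ ext := rfl
  have hgoals : (((Dpre ++ fr.map (tagD cnt)) ++ ext).filter
        (fun e => e.1.2.all (fun q => q == ((3 : Int), (3 : Int))))).map (fun e => e.2.1)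
      = (fr.filter (fun y => y.2.all (fun q => q == ((3 : Int), (3 : Int))))).map (fun _ => cnt)
        ++ (ext.filter (fun e => e.1.2.all (fun q => q == ((3 : Int), (3 : Int))))).map
          (fun e => e.2.1) := by
    rw [List.filter_append, List.filter_append, List.filter_eq_nil_iff.mpr hgf,
      List.filter_map, List.map_append, List.map_append, List.map_map,
      show ((fun e : StT × (Int × List StT) => e.1.2.all (fun q => q == ((3 : Int), (3 : Int))))
          ∘ tagD cnt) = (fun y : StT => y.2.all (fun q => q == ((3 : Int), (3 : Int)))) from rfl,
      show ((fun e : StT × (Int × List StT) => e.2.1) ∘ tagD cnt) = (fun _ : StT => cnt) from rfl]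
    rfl
  show (if ((((Dpre ++ fr.map (tagD cnt)) ++ ext).filter
        (fun e => e.1.2.all (fun q => q == ((3 : Int), (3 : Int))))).map (fun e => e.2.1)).isEmpty
      then none
      else PySem.List.min? ((((Dpre ++ fr.map (tagD cnt)) ++ ext).filter
        (fun e => e.1.2.all (fun q => q == ((3 : Int), (3 : Int))))).map (fun e => e.2.1))
        (fun v => v)) = _
  rw [hgoals]

lemma fixlevel (n : Nat) (W : List Int) (h03 : ∀ i : Int, 0 ≤ i → i ≤ 3 → i ∈ W) :
    ∀ (fF : Nat) (Dpre : List (StT × (Int × List StT))) (fr : List StT) (cnt : Int) (fL : Nat),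
    (Dpre.map Prod.fst ++ fr).Nodup →
    (∀ st ∈ Dpre.map Prod.fst ++ fr, ValidSt n W st) →
    (∀ e ∈ Dpre, ∀ nb ∈ e.2.2, nb ∈ Dpre.map Prod.fst ++ fr) →
    (∀ e ∈ Dpre, ¬ (e.1.2.all (fun q => q == ((3 : Int), (3 : Int))) = true)) →
    4 * (W.length ^ 2) ^ n + 2 - (Dpre.map Prod.fst ++ fr).length ≤ fF →
    4 * (W.length ^ 2) ^ n + 2 - (Dpre.map Prod.fst ++ fr).length ≤ fL →
    (loopFix fF (PySem.Dict.mk (Dpre ++ fr.map (tagD cnt)))).map extractMin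
      = loopLevel fL fr cnt (Dpre.map Prod.fst ++ fr) := by
  intro fF
  induction fF with
  | zero =>
    intro Dpre fr cnt fL hnd hv hclosed hgf hfF hfL
    exfalso
    have := card_le n W (Dpre.map Prod.fst ++ fr) hnd hv
    omega
  | succ fF ih =>
    intro Dpre fr cnt fL hnd hv hclosed hgf hfF hfL
    have hcard := card_le n W (Dpre.map Prod.fst ++ fr) hnd hv
    obtain ⟨fL', rfl⟩ : ∃ k, fL = k + 1 := ⟨fL - 1, by omega⟩
    have hkeys := keys_of_level Dpre fr cnt
    have hround := roundFix_level Dpre fr cnt (PySem.Dict.mk (Dpre ++ fr.map (tagD cnt))) rfl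
      (by intro e he nb hnb; rw [hkeys]; exact hclosed e he nb hnb)
    rw [hkeys] at hround
    have hstep : loopFix (fF + 1) (PySem.Dict.mk (Dpre ++ fr.map (tagD cnt)))
        = (if (roundFix (PySem.Dict.mk (Dpre ++ fr.map (tagD cnt)))).2
           then loopFix fF (roundFix (PySem.Dict.mk (Dpre ++ fr.map (tagD cnt)))).1
           else some (roundFix (PySem.Dict.mk (Dpre ++ fr.map (tagD cnt)))).1) := rfl
    cases fr with
    | nil =>
      have hM : M ([] : List StT) (Dpre.map Prod.fst ++ []) = [] := rfl
      rw [hstep,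
        show (roundFix (PySem.Dict.mk (Dpre ++ ([] : List StT).map (tagD cnt)))).2 = false from by
          rw [hround, hM]; rfl,
        show (roundFix (PySem.Dict.mk (Dpre ++ ([] : List StT).map (tagD cnt)))).1
            = PySem.Dict.mk ((Dpre ++ ([] : List StT).map (tagD cnt)) ++ []) from by
          rw [hround, hM]; rfl]
      simp only [Bool.false_eq_true, if_false, Option.map_some]
      rw [goals_extract Dpre [] [] cnt hgf]
      rfl
    | cons st fr' =>
      by_cases hany : ((st :: fr').any
          (fun s' => s'.2.all (fun q => q == ((3 : Int), (3 : Int))))) = true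
      · have hLL : loopLevel (fL' + 1) (st :: fr') cnt (Dpre.map Prod.fst ++ (st :: fr'))
            = some (some cnt) := by
          rw [show loopLevel (fL' + 1) (st :: fr') cnt (Dpre.map Prod.fst ++ (st :: fr'))
              = (if (st :: fr').any (fun s' => s'.2.all (fun q => q == ((3 : Int), (3 : Int))))
                 then some (some cnt)
                 else loopLevel fL'
                   (expandLevel (st :: fr') (Dpre.map Prod.fst ++ (st :: fr'))).1
                   (cnt + 1)
                   (expandLevel (st :: fr') (Dpre.map Prod.fst ++ (st :: fr'))).2) from rfl,
            hany]
          rfl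
        rw [hLL]
        obtain ⟨ext, hrun, hvext⟩ :=
          fix_run n W h03 (fF + 1) Dpre (st :: fr') cnt hnd hv hclosed hfF
        rw [hrun, Option.map_some, goals_extract Dpre ext (st :: fr') cnt hgf]
        obtain ⟨x, hx, hpx⟩ := List.any_eq_true.mp hany
        have hxG : x ∈ (st :: fr').filter
            (fun y => y.2.all (fun q => q == ((3 : Int), (3 : Int)))) :=
          List.mem_filter.mpr ⟨hx, hpx⟩
        have hcntmem : cnt ∈ ((st :: fr').filter
              (fun y => y.2.all (fun q => q == ((3 : Int), (3 : Int))))).map (fun _ => cnt)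
            ++ (ext.filter (fun e => e.1.2.all (fun q => q == ((3 : Int), (3 : Int))))).map
              (fun e => e.2.1) :=
          List.mem_append.mpr (Or.inl (List.mem_map.mpr ⟨x, hxG, rfl⟩))
        have hlow : ∀ y ∈ ((st :: fr').filter
              (fun y => y.2.all (fun q => q == ((3 : Int), (3 : Int))))).map (fun _ => cnt)
            ++ (ext.filter (fun e => e.1.2.all (fun q => q == ((3 : Int), (3 : Int))))).map
              (fun e => e.2.1), cnt ≤ y := by
          intro y hy
          rcases List.mem_append.mp hy with h | h
          · obtain ⟨z, hz, rfl⟩ := List.mem_map.mp h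
            exact le_refl _
          · obtain ⟨e, he, rfl⟩ := List.mem_map.mp h
            exact le_of_lt (hvext e (List.mem_of_mem_filter he))
        have hne : (((st :: fr').filter
              (fun y => y.2.all (fun q => q == ((3 : Int), (3 : Int))))).map (fun _ => cnt)
            ++ (ext.filter (fun e => e.1.2.all (fun q => q == ((3 : Int), (3 : Int))))).map
              (fun e => e.2.1)).isEmpty = false := by
          rw [List.isEmpty_eq_false_iff]
          exact List.ne_nil_of_mem hcntmem
        simp only [hne, Bool.false_eq_true, if_false,
          min?_const_min cnt _ hcntmem hlow]
      · have hany' : ((st :: fr').any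
            (fun s' => s'.2.all (fun q => q == ((3 : Int), (3 : Int))))) = false :=
          Bool.eq_false_iff.mpr hany
        have hLL : loopLevel (fL' + 1) (st :: fr') cnt (Dpre.map Prod.fst ++ (st :: fr'))
            = loopLevel fL' (M (st :: fr') (Dpre.map Prod.fst ++ (st :: fr'))) (cnt + 1)
                ((Dpre.map Prod.fst ++ (st :: fr'))
                  ++ M (st :: fr') (Dpre.map Prod.fst ++ (st :: fr'))) := by
          rw [show loopLevel (fL' + 1) (st :: fr') cnt (Dpre.map Prod.fst ++ (st :: fr'))
              = (if (st :: fr').any (fun s' => s'.2.all (fun q => q == ((3 : Int), (3 : Int))))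
                 then some (some cnt)
                 else loopLevel fL'
                   (expandLevel (st :: fr') (Dpre.map Prod.fst ++ (st :: fr'))).1
                   (cnt + 1)
                   (expandLevel (st :: fr') (Dpre.map Prod.fst ++ (st :: fr'))).2) from rfl,
            hany']
          rw [expandLevel_eq, pend_shape]
          simp only [Bool.false_eq_true, if_false, List.nil_append]
        rw [hLL, hstep,
          show (roundFix (PySem.Dict.mk (Dpre ++ (st :: fr').map (tagD cnt)))).2
            = !(M (st :: fr') (Dpre.map Prod.fst ++ (st :: fr'))).isEmpty from by rw [hround],
          show (roundFix (PySem.Dict.mk (Dpre ++ (st :: fr').map (tagD cnt)))).1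
            = PySem.Dict.mk ((Dpre ++ (st :: fr').map (tagD cnt))
                ++ (M (st :: fr') (Dpre.map Prod.fst ++ (st :: fr'))).map (tagD (cnt + 1)))
            from by rw [hround]]
        have hvfr : ∀ y ∈ (st :: fr'), ValidSt n W y := fun y hy => hv y (by simp [hy])
        obtain ⟨news, hp1, hp2, hp3⟩ :=
          pendFold_spec n W h03 (st :: fr') hvfr [] (Dpre.map Prod.fst ++ (st :: fr'))
        have hnews : news = M (st :: fr') (Dpre.map Prod.fst ++ (st :: fr')) := by
          have := (pend_shape (st :: fr') (Dpre.map Prod.fst ++ (st :: fr')) []).symm.trans hp1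
          simpa using (congrArg Prod.fst this).symm
        subst hnews
        by_cases hLe : (M (st :: fr') (Dpre.map Prod.fst ++ (st :: fr'))).isEmpty
        · have hLnil := List.isEmpty_iff.mp hLe
          rw [hLnil]
          simp only [List.isEmpty_nil, Bool.not_true, Bool.false_eq_true, if_false,
            Option.map_some, List.map_nil]
          rw [goals_extract Dpre [] (st :: fr') cnt hgf]
          have hGnil : (st :: fr').filter
              (fun y => y.2.all (fun q => q == ((3 : Int), (3 : Int)))) = [] := by
            rw [List.filter_eq_nil_iff]
            intro y hy
            have := List.any_eq_false.mp hany' y hy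
            simp [this]
          rw [hGnil]
          obtain ⟨fL'', rfl⟩ : ∃ k, fL' = k + 1 := ⟨fL' - 1, by omega⟩
          rfl
        · have hflag : (!(M (st :: fr') (Dpre.map Prod.fst ++ (st :: fr'))).isEmpty) = true := by
            simp [hLe]
          rw [if_pos hflag]
          have hmapfst : (Dpre ++ (st :: fr').map (tagD cnt)).map Prod.fst
              = Dpre.map Prod.fst ++ (st :: fr') := keys_of_level Dpre (st :: fr') cnt
          have hclosed' : ∀ e ∈ Dpre ++ (st :: fr').map (tagD cnt), ∀ nb ∈ e.2.2,
              nb ∈ (Dpre ++ (st :: fr').map (tagD cnt)).map Prod.fst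
                ++ M (st :: fr') (Dpre.map Prod.fst ++ (st :: fr')) := by
            intro e he nb hnb
            rw [hmapfst]
            rcases List.mem_append.mp he with h | h
            · exact List.mem_append.mpr (Or.inl (hclosed e h nb hnb))
            · obtain ⟨y, hy, rfl⟩ := List.mem_map.mp h
              exact closure_M (st :: fr') (Dpre.map Prod.fst ++ (st :: fr')) y hy nb hnb
          have hnd' : ((Dpre ++ (st :: fr').map (tagD cnt)).map Prod.fst
              ++ M (st :: fr') (Dpre.map Prod.fst ++ (st :: fr'))).Nodup := by
            rw [hmapfst]; exact hp3 hnd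
          have hv' : ∀ y ∈ (Dpre ++ (st :: fr').map (tagD cnt)).map Prod.fst
              ++ M (st :: fr') (Dpre.map Prod.fst ++ (st :: fr')), ValidSt n W y := by
            rw [hmapfst]
            intro y hy
            rcases List.mem_append.mp hy with h | h
            · exact hv y h
            · exact hp2 y h
          have hgf' : ∀ e ∈ Dpre ++ (st :: fr').map (tagD cnt),
              ¬ (e.1.2.all (fun q => q == ((3 : Int), (3 : Int))) = true) := by
            intro e he
            rcases List.mem_append.mp he with h | h
            · exact hgf e h
            · obtain ⟨y, hy, rfl⟩ := List.mem_map.mp h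
              have := List.any_eq_false.mp hany' y hy
              simp [tagD, this]
          have hlen1 : 1 ≤ (M (st :: fr') (Dpre.map Prod.fst ++ (st :: fr'))).length := by
            cases hM : M (st :: fr') (Dpre.map Prod.fst ++ (st :: fr')) with
            | nil => rw [hM] at hLe; simp at hLe
            | cons a l => simp
          have hlenF : 4 * (W.length ^ 2) ^ n + 2
              - ((Dpre ++ (st :: fr').map (tagD cnt)).map Prod.fst
                 ++ M (st :: fr') (Dpre.map Prod.fst ++ (st :: fr'))).length ≤ fF := by
            rw [hmapfst]
            simp only [List.length_append] at hfF ⊢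
            omega
          have hlenL : 4 * (W.length ^ 2) ^ n + 2
              - ((Dpre ++ (st :: fr').map (tagD cnt)).map Prod.fst
                 ++ M (st :: fr') (Dpre.map Prod.fst ++ (st :: fr'))).length ≤ fL' := by
            rw [hmapfst]
            simp only [List.length_append] at hfL ⊢
            omega
          have := ih (Dpre ++ (st :: fr').map (tagD cnt))
            (M (st :: fr') (Dpre.map Prod.fst ++ (st :: fr'))) (cnt + 1) fL'
            hnd' hv' hclosed' hgf' hlenF hlenL
          rw [this, hmapfst]

-- ===== VERDICT (by name: the statement is the Claim_ definition above) =====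
theorem bfs_spec : Claim_equal_bfs := by
  intro x _
  unfold Spec_bfs bfs bfs_alt
  have hof : PySem.Set.ofList [((0 : Int), x)] = [((0 : Int), x)] :=
    PySem.Set.ofList_eq_self_of_nodup _ (List.nodup_singleton _)
  rw [hof]
  have h03 : ∀ i : Int, 0 ≤ i → i ≤ 3 → i ∈ WS x := by
    intro i h1 h2
    have : i = 0 ∨ i = 1 ∨ i = 2 ∨ i = 3 := by omega
    rcases this with h | h | h | h <;> simp [WS, h]
  have hval : ValidSt x.length (WS x) ((0 : Int), x) := by
    refine ⟨by simp, rfl, ?_⟩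
    intro p hp
    constructor <;>
      · simp only [WS, List.mem_append]
        right
        exact List.mem_flatMap.mpr ⟨p, hp, by simp⟩
  have hWlen : (WS x).length = 4 + 2 * x.length := length_WS x
  have key := outer x.length (WS x) h03
      (4 * ((4 + 2 * x.length) ^ 2) ^ x.length + 2)
      [((0 : Int), x)] 0 [((0 : Int), x)]
      (2 * (4 * ((4 + 2 * x.length) ^ 2) ^ x.length) + 3)
      (List.nodup_singleton _)
      (by intro st hst; simp only [List.mem_singleton] at hst; rw [hst]; exact hval)
      (by intro st hst; simp only [List.mem_singleton] at hst; rw [hst]; exact hval)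
      (by rw [hWlen]
          generalize (4 * ((4 + 2 * x.length) ^ 2) ^ x.length) = B
          simp only [List.length_singleton]
          omega)
      (by rw [hWlen]
          generalize (4 * ((4 + 2 * x.length) ^ 2) ^ x.length) = B
          simp only [List.length_singleton]
          omega)
  have hmap : ([((0 : Int), x)] : List StT).map (tagQ 0) = [((0 : Int), x, (0 : Int))] := rfl
  rw [hmap] at key
  rw [key]
  have keyB : (loopFix (4 * ((4 + 2 * x.length) ^ 2) ^ x.length + 2)
        (PySem.Dict.mk [(((0 : Int), x), ((0 : Int), neighborsB 0 x))])).map extractMin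
      = loopLevel (4 * ((4 + 2 * x.length) ^ 2) ^ x.length + 2) [((0 : Int), x)] 0
        [((0 : Int), x)] :=
    fixlevel x.length (WS x) h03
      (4 * ((4 + 2 * x.length) ^ 2) ^ x.length + 2)
      [] [((0 : Int), x)] 0
      (4 * ((4 + 2 * x.length) ^ 2) ^ x.length + 2)
      (List.nodup_singleton _)
      (by intro st hst; simp only [List.nil_append, List.map_nil, List.mem_singleton] at hst
          rw [hst]; exact hval)
      (by intro e he; simp at he)
      (by intro e he; simp at he)
      (by rw [hWlen]
          generalize (4 * ((4 + 2 * x.length) ^ 2) ^ x.length) = B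
          simp)
      (by rw [hWlen]
          generalize (4 * ((4 + 2 * x.length) ^ 2) ^ x.length) = B
          simp)
  rw [keyB]
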